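-- pv_equiv track=rewrite | github.com/Saket-Kr/aeo-analyzer | app/services/aeo_checks/htag_hierarchy.py | _find_violations
-- ===== SOURCE A (Python) =====
-- def _find_violations(headings: list[tuple[str, str]]) -> list[str]:
--     violations = []
--
--     h1_count = sum(1 for tag, _ in headings if tag == "h1")
--     if h1_count == 0:
--         violations.append("Missing H1 tag")
--     elif h1_count > 1:
--         violations.append(f"Multiple H1 tags found ({h1_count})")
--
--     for tag, text in headings:
--         if tag == "h1":
--             break
--         violations.append(f"{tag.upper()} '{text}' appears before the first H1")
--
--     levels = [int(tag[1]) for tag, _ in headings]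
--     for i in range(1, len(levels)):
--         if levels[i] > levels[i - 1] + 1:
--             prev_tag = f"H{levels[i - 1]}"
--             curr_tag = f"H{levels[i]}"
--             skipped = f"H{levels[i - 1] + 1}"
--             violations.append(f"{curr_tag} found after {prev_tag} — skipped {skipped}")
--
--     return violations
-- ===== SOURCE B (Python) =====
-- def _find_violations(headings: list[tuple[str, str]]) -> list[str]:
--     h1_count = 0
--     seen_h1 = False
--     prev_level = None
--     before_h1 = []
--     skips = []
--     for tag, text in headings:
--         level = int(tag[1])
--         if prev_level is not None and level > prev_level + 1:
--             skips.append(f"H{level} found after H{prev_level} — skipped H{prev_level + 1}")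
--         if tag == "h1":
--             h1_count += 1
--             seen_h1 = True
--         elif not seen_h1:
--             before_h1.append(f"{tag.upper()} '{text}' appears before the first H1")
--         prev_level = level
--     if h1_count == 0:
--         head = ["Missing H1 tag"]
--     elif h1_count > 1:
--         head = [f"Multiple H1 tags found ({h1_count})"]
--     else:
--         head = []
--     return head + before_h1 + skips
-- ===== Notes on version B (the rewrite author's own statement) =====
-- stated objective: simpler
-- what changed: A's three separate traversals (h1 count, before-first-H1 break loop, index loop over a precomputed level list) are fused into one pass maintaining h1_count, seen_h1, prev_level and two accumulator lists, concatenated afterwards to preserve A's output order.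
import Mathlib
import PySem

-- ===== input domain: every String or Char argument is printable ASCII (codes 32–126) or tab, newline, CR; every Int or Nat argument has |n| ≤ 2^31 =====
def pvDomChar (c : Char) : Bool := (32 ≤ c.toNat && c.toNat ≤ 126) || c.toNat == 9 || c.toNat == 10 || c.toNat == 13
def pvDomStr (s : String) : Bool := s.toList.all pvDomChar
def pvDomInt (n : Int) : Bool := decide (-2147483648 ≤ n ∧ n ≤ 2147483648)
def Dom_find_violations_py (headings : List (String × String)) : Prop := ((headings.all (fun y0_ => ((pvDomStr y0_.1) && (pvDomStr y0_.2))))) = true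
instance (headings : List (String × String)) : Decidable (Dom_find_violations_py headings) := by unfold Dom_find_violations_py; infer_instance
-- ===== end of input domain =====

-- B fuses A's three traversals (h1 count, before-first-H1 scan, skip-level index loop) into one pass
-- with separate accumulator lists; same output, objective: simpler/alternative decomposition.

-- shared message/level formatting (both Pythons format identically)
def pvLevel (t : String) : Int :=
  ((PySem.List.pyGet? t.toList 1).bind (fun c => PySem.Int.ofChars? [c])).getD 0

def pvMsgBefore (t x : String) : String :=
  PySem.Str.upper t ++ " '" ++ x ++ "' appears before the first H1"

def pvMsgSkip (p cur : Int) : String :=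
  "H" ++ PySem.Int.toStr cur ++ " found after H" ++ PySem.Int.toStr p ++ " — skipped H" ++ PySem.Int.toStr (p + 1)

def pvMsgCount (c : Int) : List String :=
  if c = 0 then ["Missing H1 tag"]
  else if c > 1 then ["Multiple H1 tags found (" ++ PySem.Int.toStr c ++ ")"]
  else []

-- ===== PORT A =====
-- A's 'for tag, text in headings: if tag == "h1": break; append(...)'
def pvBeforeA : List (String × String) → List String
  | [] => []
  | (t, x) :: rest => if t = "h1" then [] else pvMsgBefore t x :: pvBeforeA rest

def find_violations_py (headings : List (String × String)) : List String :=
  let h1_count : Int := headings.foldl (fun acc p => if p.1 = "h1" then acc + 1 else acc) 0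
  let violations := pvMsgCount h1_count ++ pvBeforeA headings
  let levels := headings.map (fun p => pvLevel p.1)
  (PySem.List.pyRange 1 (levels.length : Int) 1).foldl
    (fun acc i =>
      if PySem.List.pyGetD levels i 0 > PySem.List.pyGetD levels (i - 1) 0 + 1 then
        acc ++ [pvMsgSkip (PySem.List.pyGetD levels (i - 1) 0) (PySem.List.pyGetD levels i 0)]
      else acc)
    violations

-- ===== PORT B =====
-- single pass: state (h1_count, seen_h1, prev_level, before_h1 list, skip list)
def pvLoopB : List (String × String) → Int → Bool → Option Int → List String → List String →
    Int × List String × List String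
  | [], h1c, _, _, bef, sk => (h1c, bef, sk)
  | (t, x) :: rest, h1c, seen, prev, bef, sk =>
    let lv := pvLevel t
    let sk' := match prev with
      | some p => if lv > p + 1 then sk ++ [pvMsgSkip p lv] else sk
      | none => sk
    if t = "h1" then pvLoopB rest (h1c + 1) true (some lv) bef sk'
    else pvLoopB rest h1c seen (some lv) (if seen then bef else bef ++ [pvMsgBefore t x]) sk'

def find_violations_py_alt (headings : List (String × String)) : List String :=
  let r := pvLoopB headings 0 false none [] []
  pvMsgCount r.1 ++ r.2.1 ++ r.2.2

-- ===== PRECONDITION & SPEC =====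
-- Pre_ excludes exactly the inputs where Python raises: some tag on which int(tag[1]) fails
-- (tag shorter than 2 chars, or its second char not a digit).
def Pre_find_violations_py (headings : List (String × String)) : Prop :=
  (headings.all (fun p =>
    ((PySem.List.pyGet? p.1.toList 1).bind (fun c => PySem.Int.ofChars? [c])).isSome)) = true
instance (headings : List (String × String)) : Decidable (Pre_find_violations_py headings) := by
  unfold Pre_find_violations_py; infer_instance

def pvWitness_find_violations_py : (List (String × String)) := [("h1", "Title"), ("h3", "Jump")]

def Spec_find_violations_py (headings : List (String × String)) (out : List String) : Prop := out = find_violations_py_alt headings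
instance (headings : List (String × String)) (out : List String) : Decidable (Spec_find_violations_py headings out) := by unfold Spec_find_violations_py; infer_instance

-- ===== CLAIM (what is proved, stated in full; the proofs are below) =====
def Claim_equal_find_violations_py : Prop := ∀ (headings : List (String × String)), Dom_find_violations_py headings → Pre_find_violations_py headings → Spec_find_violations_py headings (find_violations_py headings)

-- ===== LEMMAS AND PROOFS =====

-- A's h1 count, as structural recursion
def pvCount : List (String × String) → Int
  | [] => 0
  | p :: r => (if p.1 = "h1" then 1 else 0) + pvCount r

lemma pvCount_foldl (hs : List (String × String)) (init : Int) :
    hs.foldl (fun acc p => if p.1 = "h1" then acc + 1 else acc) init = init + pvCount hs := by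
  induction hs generalizing init with
  | nil => simp [pvCount]
  | cons p r ih => simp only [List.foldl_cons, pvCount, ih]; split_ifs <;> omega

-- A's skip-level messages, as pairwise recursion over the level list
def pvPairSkips : Int → List Int → List String
  | _, [] => []
  | p, l :: ls => (if l > p + 1 then [pvMsgSkip p l] else []) ++ pvPairSkips l ls

lemma pyGetD_append_lt (xs t : List Int) (i : Int) (h0 : 0 ≤ i) (h : i.toNat < xs.length) :
    PySem.List.pyGetD (xs ++ t) i 0 = PySem.List.pyGetD xs i 0 := by
  simp [PySem.List.pyGetD, PySem.List.pyGet?_of_nonneg _ h0,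
    List.getElem?_append_left h]

lemma pvPairSkips_snoc (p : Int) (ls : List Int) (x : Int) :
    pvPairSkips p (ls ++ [x]) =
      pvPairSkips p ls ++ (if x > (p :: ls).getLast (by simp) + 1
        then [pvMsgSkip ((p :: ls).getLast (by simp)) x] else []) := by
  induction ls generalizing p with
  | nil => simp [pvPairSkips]
  | cons l ls ih =>
      simp only [List.cons_append, pvPairSkips, ih l, List.getLast_cons_cons]
      simp [List.append_assoc]

lemma pvSkipFold (ls : List Int) (l0 : Int) (base : List String) :
    (PySem.List.pyRange 1 (((l0 :: ls).length : Nat) : Int) 1).foldl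
      (fun acc i =>
        if PySem.List.pyGetD (l0 :: ls) i 0 > PySem.List.pyGetD (l0 :: ls) (i - 1) 0 + 1 then
          acc ++ [pvMsgSkip (PySem.List.pyGetD (l0 :: ls) (i - 1) 0) (PySem.List.pyGetD (l0 :: ls) i 0)]
        else acc)
      base = base ++ pvPairSkips l0 ls := by
  induction ls using List.reverseRecOn generalizing base with
  | nil =>
      rw [show (((l0 :: ([] : List Int)).length : Nat) : Int) = 1 by simp]
      rw [PySem.List.pyRange_one_eq_nil le_rfl]
      simp [pvPairSkips]
  | append_singleton ls x ih =>
      have hlen : (((l0 :: (ls ++ [x])).length : Nat) : Int) = ((l0 :: ls).length : Int) + 1 := by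
        simp only [List.length_cons, List.length_append, List.length_nil]; push_cast; ring
      rw [hlen, PySem.List.pyRange_one_succ_right (by simp only [List.length_cons]; push_cast; omega), List.foldl_append]
      have hcongr :
          (PySem.List.pyRange 1 ((l0 :: ls).length : Int) 1).foldl
            (fun acc i =>
              if PySem.List.pyGetD (l0 :: (ls ++ [x])) i 0 > PySem.List.pyGetD (l0 :: (ls ++ [x])) (i - 1) 0 + 1 then
                acc ++ [pvMsgSkip (PySem.List.pyGetD (l0 :: (ls ++ [x])) (i - 1) 0) (PySem.List.pyGetD (l0 :: (ls ++ [x])) i 0)]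
              else acc)
            base
          = (PySem.List.pyRange 1 ((l0 :: ls).length : Int) 1).foldl
            (fun acc i =>
              if PySem.List.pyGetD (l0 :: ls) i 0 > PySem.List.pyGetD (l0 :: ls) (i - 1) 0 + 1 then
                acc ++ [pvMsgSkip (PySem.List.pyGetD (l0 :: ls) (i - 1) 0) (PySem.List.pyGetD (l0 :: ls) i 0)]
              else acc)
            base := by
        apply PySem.List.foldl_congr_mem
        intro a i hi
        rw [PySem.List.mem_pyRange_one] at hi
        have e1 : PySem.List.pyGetD (l0 :: (ls ++ [x])) i 0 = PySem.List.pyGetD (l0 :: ls) i 0 := by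
          rw [show l0 :: (ls ++ [x]) = (l0 :: ls) ++ [x] by simp]
          exact pyGetD_append_lt _ _ _ (by omega) (by simp at hi ⊢; omega)
        have e2 : PySem.List.pyGetD (l0 :: (ls ++ [x])) (i - 1) 0 = PySem.List.pyGetD (l0 :: ls) (i - 1) 0 := by
          rw [show l0 :: (ls ++ [x]) = (l0 :: ls) ++ [x] by simp]
          exact pyGetD_append_lt _ _ _ (by omega) (by simp at hi ⊢; omega)
        rw [e1, e2]
      rw [hcongr, ih]
      -- the last step of the fold: index n = (l0 :: ls).length
      have hx : PySem.List.pyGetD (l0 :: (ls ++ [x])) ((l0 :: ls).length : Int) 0 = x := by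
        rw [show l0 :: (ls ++ [x]) = (l0 :: ls) ++ [x] by simp]
        simp only [PySem.List.pyGetD, PySem.List.pyGet?_append_length, Option.getD_some]
      have hlast : PySem.List.pyGetD (l0 :: (ls ++ [x])) (((l0 :: ls).length : Int) - 1) 0
          = (l0 :: ls).getLast (by simp) := by
        rw [show l0 :: (ls ++ [x]) = (l0 :: ls) ++ [x] by simp]
        rw [pyGetD_append_lt _ _ _ (by simp) (by simp)]
        simp only [PySem.List.pyGetD]
        rw [PySem.List.pyGet?_of_nonneg _ (by simp)]
        rw [show (((l0 :: ls).length : Int) - 1).toNat = (l0 :: ls).length - 1 by omega]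
        rw [List.getElem?_eq_getElem (by simp), List.getLast_eq_getElem]
        rfl
      rw [pvPairSkips_snoc]
      simp only [List.foldl_cons, List.foldl_nil]
      rw [hx, hlast]
      split_ifs <;> simp
-- the skip messages produced by B's running prev_level state
def pvPrevSkips : Option Int → List Int → List String
  | none, [] => []
  | none, l :: ls => pvPairSkips l ls
  | some p, ls => pvPairSkips p ls

lemma pvLoopB_spec (hs : List (String × String)) (h1c : Int) (seen : Bool) (prev : Option Int)
    (bef sk : List String) :
    pvLoopB hs h1c seen prev bef sk =
      (h1c + pvCount hs,
       bef ++ (if seen then [] else pvBeforeA hs),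
       sk ++ pvPrevSkips prev (hs.map (fun p => pvLevel p.1))) := by
  induction hs generalizing h1c seen prev bef sk with
  | nil => cases prev <;> simp [pvLoopB, pvCount, pvBeforeA, pvPrevSkips, pvPairSkips]
  | cons p rest ih =>
      obtain ⟨t, x⟩ := p
      simp only [pvLoopB]
      have hstep : ∀ sk' : List String,
          sk' = sk ++ (match prev with
            | some q => if pvLevel t > q + 1 then [pvMsgSkip q (pvLevel t)] else []
            | none => []) →
          sk' ++ pvPairSkips (pvLevel t) (rest.map (fun p => pvLevel p.1))
            = sk ++ pvPrevSkips prev (((t, x) :: rest).map (fun p => pvLevel p.1)) := by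
        intro sk' h
        subst h
        cases prev with
        | none => simp [pvPrevSkips]
        | some q => simp [pvPrevSkips, pvPairSkips, List.append_assoc]
      by_cases ht : t = "h1"
      · simp only [if_pos ht, ih]
        refine Prod.ext ?_ (Prod.ext ?_ ?_)
        · simp [pvCount, ht]; ring
        · simp [pvBeforeA, ht]
        · apply hstep
          cases prev
          · simp
          · simp only []; split_ifs <;> simp
      · simp only [if_neg ht, ih]
        refine Prod.ext ?_ (Prod.ext ?_ ?_)
        · simp [pvCount, ht]
        · cases seen <;> simp [pvBeforeA, ht]
        · apply hstep
          cases prev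
          · simp
          · simp only []; split_ifs <;> simp

-- ===== VERDICT (by name: the statement is the Claim_ definition above) =====
theorem find_violations_py_spec : Claim_equal_find_violations_py := by
  intro headings _ _
  unfold Spec_find_violations_py find_violations_py find_violations_py_alt
  rw [pvLoopB_spec]
  simp only [pvCount_foldl, zero_add, Bool.false_eq_true, if_false, List.nil_append]
  cases headings with
  | nil => simp [pvPrevSkips, pvBeforeA, PySem.List.pyRange_one_eq_nil]
  | cons p rest =>
      obtain ⟨t, x⟩ := p
      simp only [List.map_cons]
      rw [show ((pvLevel t :: rest.map (fun p => pvLevel p.1)).length : Int)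
            = (((pvLevel t :: rest.map (fun p => pvLevel p.1)).length : Nat) : Int) by simp]
      rw [pvSkipFold]
      simp [pvPrevSkips, List.append_assoc]
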